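-- pv_equiv track=rewrite | github.com/WarholYuan/metaclaw | channel/feishu/feishu_channel.py | _format_tool_action_for_user
-- ===== SOURCE A (Python) =====
-- def _format_tool_action_for_user(tool_name: str) -> str:
--     labels = {
--         "read": "正在查看项目文件",
--         "open": "正在查看项目文件",
--         "write": "正在写入文件",
--         "edit": "正在修改文件",
--         "bash": "正在运行命令",
--         "exec": "正在运行命令",
--         "command": "正在运行命令",
--         "ls": "正在查看目录",
--         "grep": "正在搜索文本",
--         "glob": "正在查找文件",
--         "web_search": "正在搜索资料",
--         "web_fetch": "正在读取网页",
--         "browser": "正在操作浏览器",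
--         "memory": "正在查询记忆",
--         "scheduler": "正在处理日程任务",
--         "send": "正在发送文件",
--     }
--     normalized = (tool_name or "").replace("-", "_").lower()
--     for key, label in labels.items():
--         if normalized == key or normalized.startswith(f"{key}_"):
--             return label
--     return f"正在使用工具：{tool_name or '未知工具'}"
-- ===== SOURCE B (Python) =====
-- def _format_tool_action_for_user(tool_name: str) -> str:
--     labels = {
--         "read": "正在查看项目文件",
--         "open": "正在查看项目文件",
--         "write": "正在写入文件",
--         "edit": "正在修改文件",
--         "bash": "正在运行命令",
--         "exec": "正在运行命令",
--         "command": "正在运行命令",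
--         "ls": "正在查看目录",
--         "grep": "正在搜索文本",
--         "glob": "正在查找文件",
--         "web_search": "正在搜索资料",
--         "web_fetch": "正在读取网页",
--         "browser": "正在操作浏览器",
--         "memory": "正在查询记忆",
--         "scheduler": "正在处理日程任务",
--         "send": "正在发送文件",
--     }
--     normalized = (tool_name or "").replace("-", "_").lower()
--     # Scan once, left to right: at each '_' boundary test the accumulated
--     # prefix against the dict; finally test the whole string. At most one
--     # candidate can be a key (no key is a boundary-prefix of another), so
--     # this returns exactly A's label.
--     prefix = ""
--     for ch in normalized:
--         if ch == "_" and prefix in labels: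
--             return labels[prefix]
--         prefix += ch
--     if normalized in labels:
--         return labels[normalized]
--     return f"正在使用工具：{tool_name or '未知工具'}"
-- ===== Notes on version B (the rewrite author's own statement) =====
-- stated objective: alternative
-- what changed: Instead of looping over the 16-entry label dict and testing each key for equality or boundary-prefix against the normalized name, B scans the normalized name once left to right and looks each underscore-boundary prefix (and finally the whole string) up in the dict; correct because no key is a boundary-prefix of another key.
import Mathlib
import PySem

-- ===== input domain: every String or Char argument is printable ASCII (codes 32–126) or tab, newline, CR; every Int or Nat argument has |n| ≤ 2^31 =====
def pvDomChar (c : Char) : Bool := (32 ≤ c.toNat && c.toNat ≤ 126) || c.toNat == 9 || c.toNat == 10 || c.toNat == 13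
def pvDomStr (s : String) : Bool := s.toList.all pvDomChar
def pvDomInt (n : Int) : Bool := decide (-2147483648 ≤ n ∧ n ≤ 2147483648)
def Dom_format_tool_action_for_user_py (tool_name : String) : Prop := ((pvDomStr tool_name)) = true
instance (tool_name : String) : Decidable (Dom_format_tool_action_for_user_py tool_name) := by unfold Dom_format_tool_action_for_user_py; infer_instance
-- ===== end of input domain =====

-- B replaces A's scan over the 16-entry label dict (equality / boundary-prefix test per key)
-- by a single left-to-right scan of the normalized name that looks each underscore-boundary
-- prefix up in the dict; objective: alternative decomposition (same cost at these sizes).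

-- the labels dict, shared data of both programs (keys as char lists, insertion order)
def pvLabels : List (List Char × String) :=
  [ ("read".toList, "正在查看项目文件"),
    ("open".toList, "正在查看项目文件"),
    ("write".toList, "正在写入文件"),
    ("edit".toList, "正在修改文件"),
    ("bash".toList, "正在运行命令"),
    ("exec".toList, "正在运行命令"),
    ("command".toList, "正在运行命令"),
    ("ls".toList, "正在查看目录"),
    ("grep".toList, "正在搜索文本"),
    ("glob".toList, "正在查找文件"),
    ("web_search".toList, "正在搜索资料"),
    ("web_fetch".toList, "正在读取网页"),
    ("browser".toList, "正在操作浏览器"),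
    ("memory".toList, "正在查询记忆"),
    ("scheduler".toList, "正在处理日程任务"),
    ("send".toList, "正在发送文件") ]

-- ===== PORT A =====
-- the for-loop over labels.items(): first key with normalized == key or normalized.startswith(key + "_")
def pvFindA : List (List Char × String) → List Char → Option String
  | [], _ => none
  | (k, l) :: rest, n =>
      if n = k ∨ PySem.Chars.startswith n (k ++ ['_']) = true then some l
      else pvFindA rest n

def format_tool_action_for_user_py (tool_name : String) : String :=
  -- normalized = (tool_name or "").replace("-", "_").lower()
  let normalized : List Char :=
    PySem.Chars.lower (PySem.Chars.replace
      (if tool_name = "" then "" else tool_name).toList ['-'] ['_'])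
  match pvFindA pvLabels normalized with
  | some label => label
  | none => "正在使用工具：" ++ (if tool_name = "" then "未知工具" else tool_name)

-- ===== PORT B =====
-- 'prefix in labels' / 'labels[prefix]' as one association-list lookup
def pvLookupB : List (List Char × String) → List Char → Option String
  | [], _ => none
  | (k, l) :: rest, p => if p = k then some l else pvLookupB rest p

-- the for-loop over the characters of normalized, accumulating prefix;
-- returns labels[prefix] at the first '_' whose prefix is a key, none if the loop falls through
def pvScanB (labels : List (List Char × String)) : List Char → List Char → Option String
  | _, [] => none
  | pre, c :: rest =>
      if c = '_' ∧ (pvLookupB labels pre).isSome = true then pvLookupB labels pre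
      else pvScanB labels (pre ++ [c]) rest

def format_tool_action_for_user_py_alt (tool_name : String) : String :=
  let normalized : List Char :=
    PySem.Chars.lower (PySem.Chars.replace
      (if tool_name = "" then "" else tool_name).toList ['-'] ['_'])
  match pvScanB pvLabels [] normalized with
  | some label => label
  | none =>
    match pvLookupB pvLabels normalized with
    | some label => label
    | none => "正在使用工具：" ++ (if tool_name = "" then "未知工具" else tool_name)

-- ===== PRECONDITION & SPEC =====
def Spec_format_tool_action_for_user_py (tool_name : String) (out : String) : Prop := out = format_tool_action_for_user_py_alt tool_name
instance (tool_name : String) (out : String) : Decidable (Spec_format_tool_action_for_user_py tool_name out) := by unfold Spec_format_tool_action_for_user_py; infer_instance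

-- ===== CLAIM (what is proved, stated in full; the proofs are below) =====
def Claim_equal_format_tool_action_for_user_py : Prop := ∀ (tool_name : String), Dom_format_tool_action_for_user_py tool_name → Spec_format_tool_action_for_user_py tool_name (format_tool_action_for_user_py tool_name)

-- ===== LEMMAS AND PROOFS =====

-- "key k matches n" — A's per-key test
def pvMatches (k n : List Char) : Prop := n = k ∨ (k ++ ['_']) <+: n

def pvKeys : List (List Char) := pvLabels.map Prod.fst

-- the concrete independence fact: no key (followed by '_') is a prefix of another key (followed by '_')
theorem pvKeys_indep : ∀ k1 ∈ pvKeys, ∀ k2 ∈ pvKeys,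
    (k1 ++ ['_']).isPrefixOf (k2 ++ ['_']) = true → k1 = k2 := by decide

theorem pvKeys_nodup : pvKeys.Nodup := by decide

theorem pvMatches_prefix {k n : List Char} (h : pvMatches k n) : (k ++ ['_']) <+: (n ++ ['_']) := by
  cases h with
  | inl h => subst h; exact List.prefix_rfl
  | inr h => exact h.trans (List.prefix_append n ['_'])

-- at most one key of the dict matches a given normalized name
theorem pvMatches_unique {k1 k2 n : List Char} (h1 : k1 ∈ pvKeys) (h2 : k2 ∈ pvKeys)
    (m1 : pvMatches k1 n) (m2 : pvMatches k2 n) : k1 = k2 := by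
  rcases List.prefix_or_prefix_of_prefix (pvMatches_prefix m1) (pvMatches_prefix m2) with h | h
  · exact pvKeys_indep k1 h1 k2 h2 (List.isPrefixOf_iff_prefix.mpr h)
  · exact (pvKeys_indep k2 h2 k1 h1 (List.isPrefixOf_iff_prefix.mpr h)).symm

theorem pvLookupB_some_iff : ∀ (pairs : List (List Char × String)),
    (pairs.map Prod.fst).Nodup → ∀ p l, (pvLookupB pairs p = some l ↔ (p, l) ∈ pairs) := by
  intro pairs
  induction pairs with
  | nil => intro _ p l; simp [pvLookupB]
  | cons kv rest ih =>
    intro hnd p l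
    obtain ⟨k, v⟩ := kv
    simp only [List.map_cons, List.nodup_cons] at hnd
    by_cases hp : p = k
    · subst hp
      constructor
      · intro h
        simp only [pvLookupB] at h
        obtain rfl : v = l := Option.some.inj h
        exact List.mem_cons_self
      · intro h
        rcases List.mem_cons.mp h with h | h
        · obtain ⟨-, h2⟩ := Prod.ext_iff.mp h
          subst h2
          simp [pvLookupB]
        · exact absurd (List.mem_map.mpr ⟨(p, l), h, rfl⟩) hnd.1
    · simp only [pvLookupB, if_neg hp]
      rw [ih hnd.2 p l]
      constructor
      · exact List.mem_cons_of_mem _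
      · intro h
        rcases List.mem_cons.mp h with h | h
        · exact absurd (Prod.ext_iff.mp h).1 hp
        · exact h

theorem pvFindA_some {n : List Char} {l : String} : ∀ pairs : List (List Char × String),
    pvFindA pairs n = some l → ∃ k, (k, l) ∈ pairs ∧ pvMatches k n := by
  intro pairs
  induction pairs with
  | nil => simp [pvFindA]
  | cons kv rest ih =>
    obtain ⟨k, v⟩ := kv
    intro h
    by_cases hc : n = k ∨ PySem.Chars.startswith n (k ++ ['_']) = true
    · simp only [pvFindA, if_pos hc] at h
      obtain rfl : v = l := Option.some.inj h
      refine ⟨k, List.mem_cons_self, ?_⟩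
      rcases hc with hc | hc
      · exact Or.inl hc
      · exact Or.inr (List.isPrefixOf_iff_prefix.mp
          (by simpa [PySem.Chars.startswith] using hc))
    · simp only [pvFindA, if_neg hc] at h
      obtain ⟨k', hk', hm⟩ := ih h
      exact ⟨k', List.mem_cons_of_mem _ hk', hm⟩

theorem pvMatches_of_cond {k n : List Char}
    (hc : n = k ∨ PySem.Chars.startswith n (k ++ ['_']) = true) : pvMatches k n := by
  rcases hc with hc | hc
  · exact Or.inl hc
  · exact Or.inr (List.isPrefixOf_iff_prefix.mp (by simpa [PySem.Chars.startswith] using hc))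

theorem pvCond_of_matches {k n : List Char} (h : pvMatches k n) :
    n = k ∨ PySem.Chars.startswith n (k ++ ['_']) = true := by
  rcases h with h | h
  · exact Or.inl h
  · exact Or.inr (by simpa [PySem.Chars.startswith] using List.isPrefixOf_iff_prefix.mpr h)

-- keys determine labels in pvLabels
theorem pvLabel_fun {k : List Char} {l1 l2 : String}
    (h1 : (k, l1) ∈ pvLabels) (h2 : (k, l2) ∈ pvLabels) : l1 = l2 := by
  have e1 := (pvLookupB_some_iff pvLabels pvKeys_nodup k l1).mpr h1
  have e2 := (pvLookupB_some_iff pvLabels pvKeys_nodup k l2).mpr h2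
  rw [e1] at e2; exact (Option.some.injEq .. ▸ e2)

theorem pvFindA_of_mem {n : List Char} {l : String} :
    ∀ pairs : List (List Char × String), pairs ⊆ pvLabels →
    (∃ k, (k, l) ∈ pairs ∧ pvMatches k n) → pvFindA pairs n = some l := by
  intro pairs
  induction pairs with
  | nil => rintro _ ⟨k, hk, _⟩; simp at hk
  | cons kv rest ih =>
    obtain ⟨k0, l0⟩ := kv
    rintro hsub ⟨k, hk, hm⟩
    by_cases hc : n = k0 ∨ PySem.Chars.startswith n (k0 ++ ['_']) = true
    · simp only [pvFindA, if_pos hc]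
      have hm0 : pvMatches k0 n := pvMatches_of_cond hc
      have hk0L : k0 ∈ pvKeys := List.mem_map.mpr ⟨(k0, l0), hsub List.mem_cons_self, rfl⟩
      have hkL : k ∈ pvKeys := List.mem_map.mpr ⟨(k, l), hsub hk, rfl⟩
      have hkk : k = k0 := pvMatches_unique hkL hk0L hm hm0
      subst hkk
      exact congrArg some (pvLabel_fun (hsub List.mem_cons_self) (hsub hk))
    · simp only [pvFindA, if_neg hc]
      rcases List.mem_cons.mp hk with h | h
      · exfalso
        have : k = k0 ∧ l = l0 := by
          have := Prod.mk.injEq .. ▸ h; exact ⟨congrArg Prod.fst h, congrArg Prod.snd h⟩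
        exact hc (this.1 ▸ pvCond_of_matches hm)
      · exact ih (fun x hx => hsub (List.mem_cons_of_mem _ hx)) ⟨k, h, hm⟩

theorem pvScanB_some {l : String} : ∀ (rest pre : List Char),
    pvScanB pvLabels pre rest = some l →
    ∃ k, (k, l) ∈ pvLabels ∧ (k ++ ['_']) <+: (pre ++ rest) := by
  intro rest
  induction rest with
  | nil => intro pre h; simp [pvScanB] at h
  | cons c rest ih =>
    intro pre h
    by_cases hc : c = '_' ∧ (pvLookupB pvLabels pre).isSome = true
    · simp only [pvScanB, if_pos hc] at h
      refine ⟨pre, (pvLookupB_some_iff pvLabels pvKeys_nodup pre l).mp h, ?_⟩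
      obtain ⟨rfl, _⟩ := hc
      exact ⟨rest, by simp⟩
    · simp only [pvScanB, if_neg hc] at h
      obtain ⟨k, hk, hp⟩ := ih (pre ++ [c]) h
      exact ⟨k, hk, by simpa using hp⟩

theorem pvScanB_complete : ∀ (mid pre suf : List Char),
    (pvLookupB pvLabels (pre ++ mid)).isSome = true →
    (pvScanB pvLabels pre (mid ++ '_' :: suf)).isSome = true := by
  intro mid
  induction mid with
  | nil =>
    intro pre suf h
    simp only [List.append_nil] at h
    simp [pvScanB, h]
  | cons c mid ih =>
    intro pre suf h
    by_cases hc : c = '_' ∧ (pvLookupB pvLabels pre).isSome = true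
    · simp only [List.cons_append, pvScanB, if_pos hc]
      exact hc.2
    · simp only [List.cons_append, pvScanB, if_neg hc]
      exact ih (pre ++ [c]) suf (by simpa using h)

theorem pvB_some_iff (n : List Char) (l : String) :
    ((pvScanB pvLabels [] n).or (pvLookupB pvLabels n) = some l) ↔
    ∃ k, (k, l) ∈ pvLabels ∧ pvMatches k n := by
  constructor
  · intro h
    cases hs : pvScanB pvLabels [] n with
    | some l' =>
      rw [hs] at h
      simp only [Option.some_or] at h
      obtain ⟨k, hk, hp⟩ := pvScanB_some n [] (h ▸ hs)
      exact ⟨k, hk, Or.inr hp⟩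
    | none =>
      rw [hs, Option.none_or] at h
      exact ⟨n, (pvLookupB_some_iff pvLabels pvKeys_nodup n l).mp h, Or.inl rfl⟩
  · rintro ⟨k, hk, hm⟩
    cases hs : pvScanB pvLabels [] n with
    | some l' =>
      obtain ⟨k', hk', hp'⟩ := pvScanB_some n [] hs
      have hkL : k ∈ pvKeys := List.mem_map.mpr ⟨(k, l), hk, rfl⟩
      have hk'L : k' ∈ pvKeys := List.mem_map.mpr ⟨(k', l'), hk', rfl⟩
      have : k' = k := pvMatches_unique hk'L hkL (Or.inr (by simpa using hp')) hm
      subst this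
      have : l' = l := pvLabel_fun hk' hk
      simp [this]
    | none =>
      rcases hm with hm | hm
      · subst hm
        rw [Option.none_or]
        exact (pvLookupB_some_iff pvLabels pvKeys_nodup n l).mpr hk
      · exfalso
        obtain ⟨suf, hsuf⟩ := hm
        have hlk : (pvLookupB pvLabels ([] ++ k)).isSome = true := by
          simp [(pvLookupB_some_iff pvLabels pvKeys_nodup k l).mpr hk]
        have := pvScanB_complete k [] suf hlk
        rw [show k ++ '_' :: suf = n by simpa using hsuf] at this
        simp [hs] at this

theorem pvOption_ext {a b : Option String} (h : ∀ l, a = some l ↔ b = some l) : a = b := by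
  cases a with
  | some l => exact ((h l).mp rfl).symm
  | none =>
    cases b with
    | some l => exact absurd ((h l).mpr rfl) (by simp)
    | none => rfl

theorem pvMain (n : List Char) :
    pvFindA pvLabels n = (pvScanB pvLabels [] n).or (pvLookupB pvLabels n) := by
  apply pvOption_ext
  intro l
  rw [pvB_some_iff]
  constructor
  · exact pvFindA_some pvLabels
  · exact pvFindA_of_mem pvLabels (fun x hx => hx)

-- ===== VERDICT (by name: the statement is the Claim_ definition above) =====
theorem format_tool_action_for_user_py_spec : Claim_equal_format_tool_action_for_user_py := by
  intro t _
  show format_tool_action_for_user_py t = format_tool_action_for_user_py_alt t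
  unfold format_tool_action_for_user_py format_tool_action_for_user_py_alt
  generalize PySem.Chars.lower (PySem.Chars.replace
      (if t = "" then "" else t).toList ['-'] ['_']) = n
  dsimp only
  rw [pvMain n]
  cases hs : pvScanB pvLabels [] n <;> cases hl : pvLookupB pvLabels n <;>
    simp [Option.or]
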